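-- pv_equiv track=rewrite | github.com/bheil123/crossplay | lookahead.py | _get_leave
-- ===== SOURCE A (Python) =====
-- def _get_leave(rack: str, tiles_used: str) -> str:
--     """Get remaining tiles after playing a move."""
--     rack_list = list(rack.upper())
--     for tile in tiles_used.upper():
--         if tile in rack_list:
--             rack_list.remove(tile)
--         elif '?' in rack_list:
--             rack_list.remove('?')
--     return ''.join(rack_list)
-- ===== SOURCE B (Python) =====
-- def _get_leave(rack: str, tiles_used: str) -> str:
--     """Get remaining tiles after playing a move."""
--     ru = rack.upper()
--     avail = {}
--     for c in ru:
--         avail[c] = avail.get(c, 0) + 1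
--     removed = {}
--     for t in tiles_used.upper():
--         if avail.get(t, 0) > 0:
--             avail[t] = avail[t] - 1
--             removed[t] = removed.get(t, 0) + 1
--         elif avail.get('?', 0) > 0:
--             avail['?'] = avail['?'] - 1
--             removed['?'] = removed.get('?', 0) + 1
--     out = []
--     for c in ru:
--         if removed.get(c, 0) > 0:
--             removed[c] = removed[c] - 1
--         else:
--             out.append(c)
--     return ''.join(out)
-- ===== Notes on version B (the rewrite author's own statement) =====
-- stated objective: faster
-- what changed: Replaces the repeated list-membership-and-remove mutation of the rack with a count-then-reconstruct scheme: build a counter of the rack, consume tiles (falling back to '?') by decrementing dict counters in one pass, then rebuild the leave by skipping the recorded per-letter removal counts while walking the original rack once.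
import Mathlib
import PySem

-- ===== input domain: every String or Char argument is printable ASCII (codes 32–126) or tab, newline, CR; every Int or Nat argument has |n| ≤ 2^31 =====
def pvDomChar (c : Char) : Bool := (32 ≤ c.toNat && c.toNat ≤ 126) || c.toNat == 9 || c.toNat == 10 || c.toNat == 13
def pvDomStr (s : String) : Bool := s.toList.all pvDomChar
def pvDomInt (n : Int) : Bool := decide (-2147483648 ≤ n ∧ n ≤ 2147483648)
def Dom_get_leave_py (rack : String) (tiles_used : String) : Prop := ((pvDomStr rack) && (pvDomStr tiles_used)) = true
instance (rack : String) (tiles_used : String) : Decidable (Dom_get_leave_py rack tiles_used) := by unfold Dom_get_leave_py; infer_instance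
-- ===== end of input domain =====

-- B replaces A's repeated first-occurrence remove() on the rack list (O(n*m)) by count-then-reconstruct:
-- a counter of the rack, one dict-decrementing pass over the tiles ('?' fallback), and one skip-count pass
-- rebuilding the leave in rack order (O(n+m) expected; measurably faster on large inputs).

-- ===== PORT A =====
def get_leave_py (rack : String) (tiles_used : String) : String :=
  let rackList := PySem.Chars.upper rack.toList
  let finalList := (PySem.Chars.upper tiles_used.toList).foldl (fun rl tile =>
    if rl.contains tile then (PySem.List.remove? rl tile).getD rl
    else if rl.contains '?' then (PySem.List.remove? rl '?').getD rl
    else rl) rackList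
  String.mk finalList

-- ===== PORT B =====
def get_leave_py_alt (rack : String) (tiles_used : String) : String :=
  let ru := PySem.Chars.upper rack.toList
  let avail0 : PySem.Dict Char Int := ru.foldl (fun d c => d.insert c (d.getD c 0 + 1)) PySem.Dict.empty
  let st := (PySem.Chars.upper tiles_used.toList).foldl
    (fun (p : PySem.Dict Char Int × PySem.Dict Char Int) t =>
      if p.1.getD t 0 > 0 then
        (p.1.insert t (p.1.getD t 0 - 1), p.2.insert t (p.2.getD t 0 + 1))
      else if p.1.getD '?' 0 > 0 then
        (p.1.insert '?' (p.1.getD '?' 0 - 1), p.2.insert '?' (p.2.getD '?' 0 + 1))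
      else p) (avail0, PySem.Dict.empty)
  let fin := ru.foldl
    (fun (p : PySem.Dict Char Int × List Char) c =>
      if p.1.getD c 0 > 0 then (p.1.insert c (p.1.getD c 0 - 1), p.2)
      else (p.1, p.2 ++ [c])) (st.2, [])
  String.mk fin.2

-- ===== PRECONDITION & SPEC =====
def Spec_get_leave_py (rack : String) (tiles_used : String) (out : String) : Prop := out = get_leave_py_alt rack tiles_used
instance (rack : String) (tiles_used : String) (out : String) : Decidable (Spec_get_leave_py rack tiles_used out) := by unfold Spec_get_leave_py; infer_instance

-- ===== CLAIM (what is proved, stated in full; the proofs are below) =====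
def Claim_equal_get_leave_py : Prop := ∀ (rack : String) (tiles_used : String), Dom_get_leave_py rack tiles_used → Spec_get_leave_py rack tiles_used (get_leave_py rack tiles_used)

-- ===== LEMMAS AND PROOFS =====

-- skip xs f drops, for each character c, the first (f c) occurrences of c from xs.
def pvSkip : List Char → (Char → Int) → List Char
  | [], _ => []
  | c :: cs, f => if 0 < f c then pvSkip cs (fun x => if x = c then f x - 1 else f x)
                  else c :: pvSkip cs f

theorem pvSkip_zero (xs : List Char) : pvSkip xs (fun _ => (0 : Int)) = xs := by
  induction xs with
  | nil => rfl
  | cons c cs ih => simp [pvSkip, ih]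

theorem pvSkip_erase (xs : List Char) (f : Char → Int) (hf : ∀ c, 0 ≤ f c) (t : Char)
    (ht : t ∈ pvSkip xs f) :
    (pvSkip xs f).erase t = pvSkip xs (fun x => if x = t then f x + 1 else f x) := by
  induction xs generalizing f with
  | nil => simp [pvSkip] at ht
  | cons c cs ih =>
    by_cases hc : 0 < f c
    · have hfc : (0:Int) < (if c = t then f c + 1 else f c) := by split <;> omega
      simp only [pvSkip, if_pos hc] at ht ⊢
      rw [if_pos hfc]
      have hrec := ih (fun x => if x = c then f x - 1 else f x)
        (fun x => by by_cases hx : x = c <;> simp [hx] <;> [omega; exact hf x]) ht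
      rw [hrec]
      congr 1
      funext x
      by_cases hx1 : x = c <;> by_cases hx2 : x = t <;>
        simp only [hx1, hx2, if_pos] <;> split_ifs <;> simp_all
    · have hc0 : f c = 0 := le_antisymm (by omega) (hf c)
      simp only [pvSkip, if_neg hc] at ht
      by_cases hct : t = c
      · subst hct
        simp only [pvSkip]
        rw [if_neg hc, List.erase_cons_head,
          if_pos (show (0:Int) < (if True then f t + 1 else f t) by
            simp only [if_true]; have := hf t; omega)]
        congr 1
        funext x
        by_cases hx : x = t <;> simp [hx]
      · have hct' : ¬ c = t := fun h => hct h.symm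
        have hgc : ¬ (0:Int) < (if c = t then f c + 1 else f c) := by
          rw [if_neg hct']; omega
        simp only [pvSkip]
        rw [if_neg hc, if_neg hgc, List.erase_cons_tail (by simp [hct'])]
        have hmem : t ∈ pvSkip cs f := by
          rcases List.mem_cons.mp ht with h | h
          · exact absurd h hct
          · exact h
        rw [ih f hf hmem]

-- The reconstruction pass of B computes pvSkip.
theorem pvOut_fold (xs : List Char) (d : PySem.Dict Char Int) (acc : List Char) :
    (xs.foldl (fun (p : PySem.Dict Char Int × List Char) c =>
      if p.1.getD c 0 > 0 then (p.1.insert c (p.1.getD c 0 - 1), p.2)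
      else (p.1, p.2 ++ [c])) (d, acc)).2 = acc ++ pvSkip xs (fun c => d.getD c 0) := by
  induction xs generalizing d acc with
  | nil => simp [pvSkip]
  | cons c cs ih =>
    by_cases h : d.getD c 0 > 0
    · simp only [List.foldl_cons, pvSkip, if_pos h]
      rw [ih]
      congr 2
      funext x
      by_cases hx : x = c <;> simp [hx, PySem.Dict.getD_insert]
    · simp only [List.foldl_cons, pvSkip, if_neg h]
      rw [ih]
      simp

-- Invariant through the tile-consumption loop: A's rack list L has the counts of B's avail
-- dict and equals pvSkip ru (B's removed dict), with removed counts nonnegative.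
theorem pvTiles_inv (ts : List Char) (ru : List Char) (L : List Char)
    (dg df : PySem.Dict Char Int)
    (h1 : ∀ c, dg.getD c 0 = (L.count c : Int))
    (h2 : L = pvSkip ru (fun c => df.getD c 0))
    (h3 : ∀ c, 0 ≤ df.getD c 0) :
    (∀ c, (ts.foldl (fun (p : PySem.Dict Char Int × PySem.Dict Char Int) t =>
      if p.1.getD t 0 > 0 then
        (p.1.insert t (p.1.getD t 0 - 1), p.2.insert t (p.2.getD t 0 + 1))
      else if p.1.getD '?' 0 > 0 then
        (p.1.insert '?' (p.1.getD '?' 0 - 1), p.2.insert '?' (p.2.getD '?' 0 + 1))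
      else p) (dg, df)).1.getD c 0
        = ((ts.foldl (fun rl tile =>
            if rl.contains tile then (PySem.List.remove? rl tile).getD rl
            else if rl.contains '?' then (PySem.List.remove? rl '?').getD rl
            else rl) L).count c : Int)) ∧
    (ts.foldl (fun rl tile =>
        if rl.contains tile then (PySem.List.remove? rl tile).getD rl
        else if rl.contains '?' then (PySem.List.remove? rl '?').getD rl
        else rl) L)
      = pvSkip ru (fun c => (ts.foldl (fun (p : PySem.Dict Char Int × PySem.Dict Char Int) t =>
          if p.1.getD t 0 > 0 then
            (p.1.insert t (p.1.getD t 0 - 1), p.2.insert t (p.2.getD t 0 + 1))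
          else if p.1.getD '?' 0 > 0 then
            (p.1.insert '?' (p.1.getD '?' 0 - 1), p.2.insert '?' (p.2.getD '?' 0 + 1))
          else p) (dg, df)).2.getD c 0) ∧
    (∀ c, 0 ≤ (ts.foldl (fun (p : PySem.Dict Char Int × PySem.Dict Char Int) t =>
          if p.1.getD t 0 > 0 then
            (p.1.insert t (p.1.getD t 0 - 1), p.2.insert t (p.2.getD t 0 + 1))
          else if p.1.getD '?' 0 > 0 then
            (p.1.insert '?' (p.1.getD '?' 0 - 1), p.2.insert '?' (p.2.getD '?' 0 + 1))
          else p) (dg, df)).2.getD c 0) := by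
  induction ts generalizing L dg df with
  | nil => exact ⟨h1, h2, h3⟩
  | cons t ts ih =>
    simp only [List.foldl_cons]
    by_cases hmem : t ∈ L
    · have hcnt := List.count_pos_iff.mpr hmem
      have hgt : dg.getD t 0 > 0 := by rw [h1 t]; exact_mod_cast hcnt
      have hAt : L.contains t = true := by simpa using hmem
      rw [if_pos hgt, if_pos hAt, PySem.List.remove?_eq_some_erase L t hmem, Option.getD_some]
      refine ih (L.erase t) _ _ ?_ ?_ ?_
      · intro c
        by_cases hc : c = t
        · subst hc
          rw [PySem.Dict.getD_insert_self, h1 c]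
          simp only [List.count_erase, beq_self_eq_true, if_pos]
          omega
        · rw [PySem.Dict.getD_insert_of_ne _ _ _ hc, h1 c]
          simp only [List.count_erase]
          rw [if_neg (by simpa using fun h => hc h.symm)]
          omega
      · have ht' : t ∈ pvSkip ru (fun c => df.getD c 0) := h2 ▸ hmem
        rw [h2, pvSkip_erase ru _ h3 t ht']
        congr 1
        funext x
        by_cases hx : x = t <;> simp [hx, PySem.Dict.getD_insert]
      · intro c
        by_cases hc : c = t <;> simp [hc, PySem.Dict.getD_insert] <;> [skip; exact h3 c]
        have := h3 t; omega
    · have hngt : ¬ dg.getD t 0 > 0 := by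
        rw [h1 t]
        have : L.count t = 0 := List.count_eq_zero.mpr hmem
        omega
      have hAnt : ¬ L.contains t = true := by simpa using hmem
      rw [if_neg hngt, if_neg hAnt]
      by_cases hq : '?' ∈ L
      · have hcnt := List.count_pos_iff.mpr hq
        have hgt : dg.getD '?' 0 > 0 := by rw [h1 '?']; exact_mod_cast hcnt
        have hAq : L.contains '?' = true := by simpa using hq
        rw [if_pos hgt, if_pos hAq, PySem.List.remove?_eq_some_erase L '?' hq, Option.getD_some]
        refine ih (L.erase '?') _ _ ?_ ?_ ?_
        · intro c
          by_cases hc : c = '?'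
          · subst hc
            rw [PySem.Dict.getD_insert_self, h1 '?']
            simp only [List.count_erase, beq_self_eq_true, if_pos]
            omega
          · rw [PySem.Dict.getD_insert_of_ne _ _ _ hc, h1 c]
            simp only [List.count_erase]
            rw [if_neg (by simpa using fun h => hc h.symm)]
            omega
        · have ht' : '?' ∈ pvSkip ru (fun c => df.getD c 0) := h2 ▸ hq
          rw [h2, pvSkip_erase ru _ h3 '?' ht']
          congr 1
          funext x
          by_cases hx : x = '?' <;> simp [hx, PySem.Dict.getD_insert]
        · intro c
          by_cases hc : c = '?' <;> simp [hc, PySem.Dict.getD_insert] <;> [skip; exact h3 c]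
          have := h3 '?'; omega
      · have hnq : ¬ dg.getD '?' 0 > 0 := by
          rw [h1 '?']
          have : L.count '?' = 0 := List.count_eq_zero.mpr hq
          omega
        have hAnq : ¬ L.contains '?' = true := by simpa using hq
        rw [if_neg hnq, if_neg hAnq]
        exact ih L dg df h1 h2 h3

-- ===== VERDICT (by name: the statement is the Claim_ definition above) =====
theorem get_leave_py_spec : Claim_equal_get_leave_py := by
  intro rack tiles_used _
  show get_leave_py rack tiles_used = get_leave_py_alt rack tiles_used
  unfold get_leave_py get_leave_py_alt
  dsimp only
  have hzero : (fun c => (PySem.Dict.empty : PySem.Dict Char Int).getD c 0) = (fun _ => (0:Int)) := by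
    funext c; simp [pysem]
  have h := pvTiles_inv (PySem.Chars.upper tiles_used.toList) (PySem.Chars.upper rack.toList)
      (PySem.Chars.upper rack.toList)
      ((PySem.Chars.upper rack.toList).foldl (fun d c => d.insert c (d.getD c 0 + 1)) PySem.Dict.empty)
      PySem.Dict.empty
      (fun c => by rw [PySem.Dict.getD_foldl_insert_add_one]; simp [pysem])
      (by rw [hzero, pvSkip_zero])
      (fun c => by simp [pysem])
  rw [pvOut_fold, h.2.1]
  simp
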